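-- pv_equiv track=rewrite | github.com/Diogo-M/Advent-Of-Code-2022 | day3/day3.py | organizeRucksacksIntoElfGroups
-- ===== SOURCE A (Python) =====
-- def organizeRucksacksIntoElfGroups(Lines):
--     rucksacksByGroup = []
--     count = 0
--     currentGroup = []
--
--     for line in Lines:
--         count += 1
--         lenght = len(line) - 1
--         currentGroup.append(line[0:lenght])
--         if count > 2:
--             rucksacksByGroup.append(currentGroup)
--             count = 0
--             currentGroup = []
--
--     return rucksacksByGroup
-- ===== SOURCE B (Python) =====
-- def organizeRucksacksIntoElfGroups(Lines):
--     s = [line[:-1] for line in Lines]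
--     return [s[3 * k : 3 * k + 3] for k in range(len(s) // 3)]
-- ===== Notes on version B (the rewrite author's own statement) =====
-- stated objective: simpler
-- what changed: Replaces the counter-driven accumulator loop (count, currentGroup, reset-on-3) by a two-step decomposition: strip every line in one map, then take complete triples by index-based slicing over range(len//3).
import Mathlib
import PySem

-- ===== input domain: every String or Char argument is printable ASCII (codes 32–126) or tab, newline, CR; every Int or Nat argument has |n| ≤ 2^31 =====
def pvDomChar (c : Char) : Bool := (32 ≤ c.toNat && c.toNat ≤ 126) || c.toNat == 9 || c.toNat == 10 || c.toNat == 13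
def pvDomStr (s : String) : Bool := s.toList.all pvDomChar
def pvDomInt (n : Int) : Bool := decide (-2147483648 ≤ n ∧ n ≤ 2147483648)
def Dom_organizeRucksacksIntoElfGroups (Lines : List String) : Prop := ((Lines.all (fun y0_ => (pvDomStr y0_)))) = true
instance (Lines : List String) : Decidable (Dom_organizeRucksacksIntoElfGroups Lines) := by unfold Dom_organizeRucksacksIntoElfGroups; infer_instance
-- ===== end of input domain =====

-- B strips every line in one map and then takes complete triples by index-based
-- slicing over range(len // 3), replacing A's counter-driven accumulator loop (simpler decomposition).


-- ===== PORT A =====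
def organizeRucksacksIntoElfGroups (Lines : List String) : List (List String) :=
  (Lines.foldl
    (fun (st : List (List String) × Int × List String) line =>
      let count := st.2.1 + 1
      let lenght := PySem.Str.len line - 1
      let currentGroup := st.2.2 ++ [PySem.Str.slice line (some 0) (some lenght)]
      if count > 2 then (st.1 ++ [currentGroup], 0, [])
      else (st.1, count, currentGroup))
    ([], 0, [])).1

-- ===== PORT B =====
def organizeRucksacksIntoElfGroups_alt (Lines : List String) : List (List String) :=
  let s := Lines.map (fun line => PySem.Str.slice line none (some (-1)))
  (PySem.List.pyRange 0 (PySem.Int.floordiv (s.length : Int) 3)).map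
    (fun k => PySem.List.slice s (some (3 * k)) (some (3 * k + 3)))

-- ===== PRECONDITION & SPEC =====
def Spec_organizeRucksacksIntoElfGroups (Lines : List String) (out : List (List String)) : Prop := out = organizeRucksacksIntoElfGroups_alt Lines
instance (Lines : List String) (out : List (List String)) : Decidable (Spec_organizeRucksacksIntoElfGroups Lines out) := by unfold Spec_organizeRucksacksIntoElfGroups; infer_instance

-- ===== CLAIM (what is proved, stated in full; the proofs are below) =====
def Claim_equal_organizeRucksacksIntoElfGroups : Prop := ∀ (Lines : List String), Dom_organizeRucksacksIntoElfGroups Lines → Spec_organizeRucksacksIntoElfGroups Lines (organizeRucksacksIntoElfGroups Lines)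

-- ===== LEMMAS AND PROOFS =====

/-- Complete triples of a list, dropping a trailing partial group. -/
def pvChunk3 {α : Type} : List α → List (List α)
  | a :: b :: c :: t => [a, b, c] :: pvChunk3 t
  | _ => []

/-- A's fold step, named so the step equation below is a `rfl`. -/
def pvStepA (st : List (List String) × Int × List String) (line : String) :
    List (List String) × Int × List String :=
  let count := st.2.1 + 1
  let lenght := PySem.Str.len line - 1
  let currentGroup := st.2.2 ++ [PySem.Str.slice line (some 0) (some lenght)]
  if count > 2 then (st.1 ++ [currentGroup], 0, [])
  else (st.1, count, currentGroup)

/-- A's per-line strip `line[0:len(line)-1]` equals B's `line[:-1]`. -/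
lemma pvStrip_eq (line : String) :
    PySem.Str.slice line (some 0) (some (PySem.Str.len line - 1)) =
      PySem.Str.slice line none (some (-1)) := by
  apply String.toList_inj.mp
  rw [PySem.Str.slice_to_neg_one, PySem.Str.toList_slice]
  simp only [PySem.Chars.slice_eq_listSlice, PySem.List.slice_zero_start, PySem.Str.len_eq]
  rcases h : line.toList.length with _ | m
  · simp [PySem.List.slice_to_neg_one]
  · have h1 : (((m + 1 : Nat) : Int) - 1) = ((m : Nat) : Int) := by push_cast; ring
    rw [h1, PySem.List.slice_to_natCast, List.dropLast_eq_take, h]; simp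

/-- A's fold, from a fresh counter state, appends the complete triples of the stripped lines. -/
lemma pvFoldA (ls : List String) (g : List (List String)) :
    (ls.foldl pvStepA (g, 0, [])).1
    = g ++ pvChunk3 (ls.map (fun line => PySem.Str.slice line (some 0) (some (PySem.Str.len line - 1)))) := by
  induction ls using pvChunk3.induct generalizing g with
  | case1 a b c t ih =>
    have hstep : List.foldl pvStepA (g, 0, []) (a :: b :: c :: t)
        = List.foldl pvStepA
            (g ++ [[PySem.Str.slice a (some 0) (some (PySem.Str.len a - 1)),
                    PySem.Str.slice b (some 0) (some (PySem.Str.len b - 1)),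
                    PySem.Str.slice c (some 0) (some (PySem.Str.len c - 1))]], 0, []) t := rfl
    rw [hstep, ih]
    simp [pvChunk3]
  | case2 x h1 =>
    match x, h1 with
    | [], _ => simp [pvChunk3]
    | [a], _ => simp [pvChunk3, pvStepA]
    | [a, b], _ => simp [pvChunk3, pvStepA]
    | a :: b :: c :: t, h1 => exact absurd rfl (fun h => h1 a b c t h)

/-- B's range-and-slice comprehension computes the complete triples. -/
lemma pvChunkB {α : Type} (s : List α) :
    (List.range (s.length / 3)).map
      (fun (k : Nat) => PySem.List.slice s (some (3 * (k : Int))) (some (3 * (k : Int) + 3)))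
    = pvChunk3 s := by
  induction s using pvChunk3.induct with
  | case1 a b c t ih =>
    have hlen : (a :: b :: c :: t).length / 3 = t.length / 3 + 1 := by
      simp [List.length_cons]; omega
    rw [hlen, List.range_succ_eq_map, List.map_cons, List.map_map]
    congr 1
    rw [← ih]
    apply List.map_congr_left
    intro k _
    simp only [Function.comp_def, Nat.succ_eq_add_one]
    have h1 : ((3 : Int) * ((k + 1 : Nat) : Int)) = (((3 * k + 3 : Nat)) : Int) := by push_cast; ring
    have h2 : ((3 : Int) * ((k + 1 : Nat) : Int) + 3) = (((3 * k + 6 : Nat)) : Int) := by push_cast; ring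
    have h4 : ((3 : Int) * ((k : Nat) : Int)) = (((3 * k : Nat)) : Int) := by push_cast; ring
    have h5 : ((3 : Int) * ((k : Nat) : Int) + 3) = (((3 * k + 3 : Nat)) : Int) := by push_cast; ring
    rw [h2, h1, h5, h4, PySem.List.slice_natCast, PySem.List.slice_natCast]
    have hd : List.drop (3 * k + 3) (a :: b :: c :: t) = List.drop (3 * k) t := by
      simp [show 3 * k + 3 = (3 * k) + 1 + 1 + 1 from by ring, List.drop_succ_cons]
    rw [hd]
    congr 1
    omega
  | case2 x h1 =>
    match x, h1 with
    | [], _ => simp [pvChunk3]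
    | [a], _ => simp [pvChunk3]
    | [a, b], _ => simp [pvChunk3]
    | a :: b :: c :: t, h1 => exact absurd rfl (fun h => h1 a b c t h)

-- ===== VERDICT (by name: the statement is the Claim_ definition above) =====
theorem organizeRucksacksIntoElfGroups_spec : Claim_equal_organizeRucksacksIntoElfGroups := by
  intro Lines _
  unfold Spec_organizeRucksacksIntoElfGroups organizeRucksacksIntoElfGroups organizeRucksacksIntoElfGroups_alt
  dsimp only
  rw [show (fun (st : List (List String) × Int × List String) line =>
      let count := st.2.1 + 1
      let lenght := PySem.Str.len line - 1
      let currentGroup := st.2.2 ++ [PySem.Str.slice line (some 0) (some lenght)]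
      if count > 2 then (st.1 ++ [currentGroup], 0, [])
      else (st.1, count, currentGroup)) = pvStepA from rfl]
  rw [pvFoldA, List.nil_append]
  have h1 : Lines.map (fun line => PySem.Str.slice line (some 0) (some (PySem.Str.len line - 1)))
      = Lines.map (fun line => PySem.Str.slice line none (some (-1))) :=
    List.map_congr_left (fun a _ => pvStrip_eq a)
  rw [h1]
  have h2 : PySem.Int.floordiv (((Lines.map (fun line => PySem.Str.slice line none (some (-1)))).length : Nat) : Int) 3
      = (((Lines.map (fun line => PySem.Str.slice line none (some (-1)))).length / 3 : Nat) : Int) := by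
    exact_mod_cast PySem.Int.floordiv_natCast _ 3
  rw [h2, PySem.List.pyRange_zero_natCast, List.map_map]
  simp only [Function.comp_def]
  exact (pvChunkB _).symm
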